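-- pv_equiv track=rewrite | github.com/ISEglock17/ShogiGame | shogi_display.py | captured_display
-- ===== SOURCE A (Python) =====
-- def captured_display(captured_pieces):
--     """ 持ち駒の表示 """
--     # 駒の種類と日本語名称
--     piece_names = {
--         'P': '歩', 'L': '香', 'N': '桂', 'S': '銀', 'G': '金', 'K': '玉', 'R': '飛', 'B': '角'
--     }
--
--     # 持ち駒の個数を格納する辞書
--     player_pieces = {}
--     opponent_pieces = {}
--
--     if captured_pieces == "-":
--         return "自分の持ち駒: なし / 相手の持ち駒: なし"
--
--     else:
--         # SFENの文字列を解析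
--         i = 0
--         while i < len(captured_pieces):
--             char = captured_pieces[i]
--             if char.isdigit():
--                 i += 1  # 数字の次の文字に進む
--                 continue
--
--             # 持ち駒の数を取得
--             if i + 1 < len(captured_pieces) and captured_pieces[i + 1].isdigit():
--                 count = int(captured_pieces[i + 1])
--                 i += 2  # 駒と数を消費
--             else:
--                 count = 1
--                 i += 1  # 駒のみ消費
--
--             # 大文字：自分の駒、小文字：相手の駒
--             if char.isupper():
--                 player_pieces[piece_names[char]] = player_pieces.get(piece_names[char], 0) + count
--             else:
--                 opponent_pieces[piece_names[char.upper()]] = opponent_pieces.get(piece_names[char.upper()], 0) + count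
--
--         # テキスト形式に整形
--         def pieces_to_text(pieces_dict):
--             if pieces_dict:
--                 return "、".join([f"{name}{count}枚" for name, count in pieces_dict.items()])
--             else:
--                 return "なし"
--
--         player_text = pieces_to_text(player_pieces)
--         opponent_text = pieces_to_text(opponent_pieces)
--
--         return f"先手の持ち駒: {player_text} / 後手の持ち駒: {opponent_text}"
-- ===== SOURCE B (Python) =====
-- def captured_display(captured_pieces):
--     """ 持ち駒の表示 """
--     piece_names = {
--         'P': '歩', 'L': '香', 'N': '桂', 'S': '銀', 'G': '金', 'K': '玉', 'R': '飛', 'B': '角'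
--     }
--
--     if captured_pieces == "-":
--         return "自分の持ち駒: なし / 相手の持ち駒: なし"
--
--     # One pass over (char, next-char) windows: a letter is a piece, a digit
--     # directly after a letter is its count; stray digits are simply not letters.
--     player_pieces = {}
--     opponent_pieces = {}
--     for char, nxt in zip(captured_pieces, captured_pieces[1:] + ' '):
--         if char.isalpha():
--             name = piece_names[char.upper()]
--             count = int(nxt) if nxt.isdigit() else 1
--             target = player_pieces if char.isupper() else opponent_pieces
--             target[name] = target.get(name, 0) + count
--
--     def pieces_to_text(pieces_dict):
--         if pieces_dict:
--             return "、".join([f"{name}{count}枚" for name, count in pieces_dict.items()])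
--         else:
--             return "なし"
--
--     return f"先手の持ち駒: {pieces_to_text(player_pieces)} / 後手の持ち駒: {pieces_to_text(opponent_pieces)}"
-- ===== Notes on version B (the rewrite author's own statement) =====
-- stated objective: simpler
-- what changed: Replaces A's index-arithmetic while loop (manual i+=1/i+=2 consumption and a digit-skip continue) with a single pass over (char, next-char) windows from zip: a letter is a piece, a digit directly after it is its count, and stray digits need no skipping logic because they are not letters.
import Mathlib
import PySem

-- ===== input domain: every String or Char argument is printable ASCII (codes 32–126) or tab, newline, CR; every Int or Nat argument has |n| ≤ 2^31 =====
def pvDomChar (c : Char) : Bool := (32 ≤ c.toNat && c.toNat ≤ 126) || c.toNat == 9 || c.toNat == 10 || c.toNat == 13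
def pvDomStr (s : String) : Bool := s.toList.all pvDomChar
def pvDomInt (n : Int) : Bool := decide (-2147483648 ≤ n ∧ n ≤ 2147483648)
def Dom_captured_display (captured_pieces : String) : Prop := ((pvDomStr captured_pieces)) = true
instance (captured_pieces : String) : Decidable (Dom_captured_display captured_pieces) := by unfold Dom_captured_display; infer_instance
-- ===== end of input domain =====

-- B replaces A's index-arithmetic while loop with one pass over (char, next-char) windows; objective: simpler.

-- ===== PORT A =====
-- piece_names
def pvNames : PySem.Dict Char (List Char) :=
  PySem.Dict.ofList [('P', ['歩']), ('L', ['香']), ('N', ['桂']), ('S', ['銀']),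
                     ('G', ['金']), ('K', ['玉']), ('R', ['飛']), ('B', ['角'])]

-- piece_names[c]; under Pre_ the key is always present (Python would raise KeyError otherwise)
def pvName (c : Char) : List Char := (pvNames.get? c).getD []

-- the two dict-update branches of A's while body (player/opponent)
def pvStepA (c : Char) (count : Int) (pl op : PySem.Dict (List Char) Int) :
    PySem.Dict (List Char) Int × PySem.Dict (List Char) Int :=
  if PySem.Chars.isupper c then (pl.modify (pvName c) 0 (· + count), op)
  else (pl, op.modify (pvName (PySem.Chars.upperChar c)) 0 (· + count))

-- A's while loop: i advances 1 past a digit, 2 past a letter+digit, 1 past a lone letter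
def pvLoopA : List Char → PySem.Dict (List Char) Int → PySem.Dict (List Char) Int →
    PySem.Dict (List Char) Int × PySem.Dict (List Char) Int
  | [], pl, op => (pl, op)
  | c :: rest, pl, op =>
    if PySem.Chars.isdigit c then pvLoopA rest pl op
    else
      match rest with
      | d :: rest' =>
        if PySem.Chars.isdigit d then
          pvLoopA rest' (pvStepA c ((PySem.Int.ofChars? [d]).getD 0) pl op).1
            (pvStepA c ((PySem.Int.ofChars? [d]).getD 0) pl op).2
        else
          pvLoopA (d :: rest') (pvStepA c 1 pl op).1 (pvStepA c 1 pl op).2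
      | [] => pvLoopA [] (pvStepA c 1 pl op).1 (pvStepA c 1 pl op).2

-- pieces_to_text
def pvTextA (d : PySem.Dict (List Char) Int) : List Char :=
  if d.items = [] then "なし".toList
  else PySem.Chars.join "、".toList (d.items.map (fun p => p.1 ++ PySem.Int.toChars p.2 ++ ['枚']))

def captured_display (captured_pieces : String) : String :=
  if captured_pieces = "-" then "自分の持ち駒: なし / 相手の持ち駒: なし"
  else
    let st := pvLoopA captured_pieces.toList PySem.Dict.empty PySem.Dict.empty
    String.ofList ("先手の持ち駒: ".toList ++ pvTextA st.1 ++ " / 後手の持ち駒: ".toList ++ pvTextA st.2)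

-- ===== PORT B =====
-- piece_names (B's copy)
def pvNamesB : PySem.Dict Char (List Char) :=
  PySem.Dict.ofList [('P', ['歩']), ('L', ['香']), ('N', ['桂']), ('S', ['銀']),
                     ('G', ['金']), ('K', ['玉']), ('R', ['飛']), ('B', ['角'])]

-- piece_names[c.upper()] in B; under Pre_ the key is always present
def pvNameB (c : Char) : List Char := (pvNamesB.get? c).getD []

-- body of B's for loop over one (char, next-char) window
def pvStepB (p : Char × Char) (st : PySem.Dict (List Char) Int × PySem.Dict (List Char) Int) :
    PySem.Dict (List Char) Int × PySem.Dict (List Char) Int :=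
  if PySem.Chars.isalpha p.1 then
    let name := pvNameB (PySem.Chars.upperChar p.1)
    let count : Int := if PySem.Chars.isdigit p.2 then (PySem.Int.ofChars? [p.2]).getD 0 else 1
    if PySem.Chars.isupper p.1 then (st.1.modify name 0 (· + count), st.2)
    else (st.1, st.2.modify name 0 (· + count))
  else st

-- pieces_to_text (B's copy)
def pvTextB (d : PySem.Dict (List Char) Int) : List Char :=
  if d.items = [] then "なし".toList
  else PySem.Chars.join "、".toList (d.items.map (fun p => p.1 ++ PySem.Int.toChars p.2 ++ ['枚']))

def captured_display_alt (captured_pieces : String) : String :=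
  if captured_pieces = "-" then "自分の持ち駒: なし / 相手の持ち駒: なし"
  else
    let l := captured_pieces.toList
    let st := (l.zip (PySem.Chars.slice l (some 1) none ++ [' '])).foldl
      (fun st p => pvStepB p st) (PySem.Dict.empty, PySem.Dict.empty)
    String.ofList ("先手の持ち駒: ".toList ++ pvTextB st.1 ++ " / 後手の持ち駒: ".toList ++ pvTextB st.2)

-- ===== PRECONDITION & SPEC =====
-- Pre_ excludes exactly the inputs on which A raises KeyError: any character that is neither
-- a digit nor one of the eight piece letters (either case).
def Pre_captured_display (captured_pieces : String) : Prop :=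
  captured_pieces = "-" ∨
    captured_pieces.toList.all (fun c => PySem.Chars.isdigit c ||
      ['P','L','N','S','G','K','R','B','p','l','n','s','g','k','r','b'].contains c) = true
instance (captured_pieces : String) : Decidable (Pre_captured_display captured_pieces) := by
  unfold Pre_captured_display; infer_instance
def pvWitness_captured_display : String := "P2p"

def Spec_captured_display (captured_pieces : String) (out : String) : Prop :=
  out = captured_display_alt captured_pieces
instance (captured_pieces : String) (out : String) : Decidable (Spec_captured_display captured_pieces out) := by
  unfold Spec_captured_display; infer_instance

-- ===== CLAIM (what is proved, stated in full; the proofs are below) =====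
def Claim_equal_captured_display : Prop := ∀ (captured_pieces : String), Dom_captured_display captured_pieces → Pre_captured_display captured_pieces → Spec_captured_display captured_pieces (captured_display captured_pieces)

-- ===== LEMMAS AND PROOFS =====

-- the good-character condition, abbreviated for the loop lemma
def pvGood (c : Char) : Prop :=
  PySem.Chars.isdigit c = true ∨
    c ∈ ['P','L','N','S','G','K','R','B','p','l','n','s','g','k','r','b']

lemma pvPairs_cons (c : Char) (rest : List Char) :
    (c :: rest).zip ((c :: rest).tail ++ [' ']) =
      (c, rest.headD ' ') :: rest.zip (rest.tail ++ [' ']) := by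
  cases rest <;> simp

lemma pvStepB_digit (d nxt : Char) (st : PySem.Dict (List Char) Int × PySem.Dict (List Char) Int)
    (hd : PySem.Chars.isdigit d = true) : pvStepB (d, nxt) st = st := by
  simp only [PySem.Chars.isdigit, Bool.and_eq_true, decide_eq_true_eq] at hd
  have hA : ¬ ('A' ≤ d) := fun hA => absurd (hA.trans hd.2) (by decide)
  have ha : ¬ ('a' ≤ d) := fun ha => absurd (ha.trans hd.2) (by decide)
  simp [pvStepB, PySem.Chars.isalpha, PySem.Chars.isupper, PySem.Chars.islower, hA, ha]

lemma pvStepB_letter (c nxt : Char)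
    (hc : c ∈ ['P','L','N','S','G','K','R','B','p','l','n','s','g','k','r','b'])
    (st : PySem.Dict (List Char) Int × PySem.Dict (List Char) Int) :
    pvStepB (c, nxt) st =
      pvStepA c (if PySem.Chars.isdigit nxt then (PySem.Int.ofChars? [nxt]).getD 0 else 1) st.1 st.2 := by
  fin_cases hc <;> by_cases h : PySem.Chars.isdigit nxt = true <;>
    simp [pvStepB, pvStepA, pvName, h] <;> rfl

lemma pvLoop_eq (l : List Char) (hg : ∀ c ∈ l, pvGood c)
    (pl op : PySem.Dict (List Char) Int) :
    pvLoopA l pl op = (l.zip (l.tail ++ [' '])).foldl (fun st p => pvStepB p st) (pl, op) := by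
  fun_induction pvLoopA l pl op with
  | case1 pl op => simp
  | case2 c rest pl op hdig ih =>
    rw [pvPairs_cons, List.foldl_cons, pvStepB_digit c _ _ hdig,
      ih (fun x hx => hg x (List.mem_cons_of_mem _ hx))]
  | case3 c pl op hdig d rest' hd ih =>
    have hc : c ∈ ['P','L','N','S','G','K','R','B','p','l','n','s','g','k','r','b'] := by
      rcases hg c (by simp) with h | h
      · exact absurd h hdig
      · exact h
    rw [pvPairs_cons, List.foldl_cons]
    simp only [List.headD_cons]
    rw [pvStepB_letter c d hc, if_pos hd]
    rw [ih (fun x hx => hg x (by simp_all))]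
    rw [pvPairs_cons, List.foldl_cons, pvStepB_digit d _ _ hd]
  | case4 c pl op hdig d rest' hd ih =>
    have hc : c ∈ ['P','L','N','S','G','K','R','B','p','l','n','s','g','k','r','b'] := by
      rcases hg c (by simp) with h | h
      · exact absurd h hdig
      · exact h
    rw [pvPairs_cons, List.foldl_cons]
    simp only [List.headD_cons]
    rw [pvStepB_letter c d hc, if_neg hd]
    rw [ih (fun x hx => hg x (by simp_all))]
  | case5 c pl op hdig ih =>
    have hc : c ∈ ['P','L','N','S','G','K','R','B','p','l','n','s','g','k','r','b'] := by
      rcases hg c (by simp) with h | h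
      · exact absurd h hdig
      · exact h
    rw [pvPairs_cons]
    simp only [List.zip_nil_left, List.foldl_cons, List.foldl_nil, List.headD_nil]
    rw [pvStepB_letter c ' ' hc, if_neg (by decide)]
    simp [pvLoopA]

lemma pvSlice_tail (l : List Char) : PySem.Chars.slice l (some 1) none = l.tail := by
  simp [PySem.Chars.slice_eq_listSlice, PySem.List.slice_from]

-- ===== VERDICT (by name: the statement is the Claim_ definition above) =====
theorem captured_display_spec : Claim_equal_captured_display := by
  intro s _ hpre
  unfold Spec_captured_display
  by_cases hs : s = "-"
  · simp [captured_display, captured_display_alt, hs]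
  · rcases hpre with h | h
    · exact absurd h hs
    · simp only [List.all_eq_true, Bool.or_eq_true, List.contains_eq_mem, decide_eq_true_eq] at h
      simp only [captured_display, captured_display_alt, if_neg hs]
      rw [pvSlice_tail, ← pvLoop_eq s.toList h]
      rfl
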